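-- pv_equiv track=rewrite | github.com/Silvanaooo/26t1-comp9021-labs | Lab04 Solutions/ex_3_sol.py | f3_3
-- ===== SOURCE A (Python) =====
-- def f3_3(L: list) -> list:
--     """
--     Removes elements from a list where the element is the arithmetic mean of its neighbors.
--
--     Iterates through the list and removes any element that is equal to the average
--     of its immediate neighbors (i.e., where L[i] = (L[i-1] + L[i+1])/2).
--     Continues this process until no more elements can be removed.
--
--     :param L: A list of numbers
--     :return: The modified list with arithmetic mean elements removed
--     """
--     # Create a copy to avoid modifying the input list directly
--     result = L.copy()
--
--     # Continue until no more elements can be removed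
--     changed = True
--     while changed and len(result) > 2:
--         changed = False
--
--         # Iterate through the list backwards to avoid index shifting problems
--         i = len(result) - 2
--         while i > 0:
--             # Check if current element is arithmetic mean of neighbors
--             if result[i - 1] + result[i + 1] == result[i] * 2:
--                 # Remove the current element
--                 result.pop(i)
--                 changed = True
--             i -= 1
--
--     # Return the modified list
--     return result
-- ===== SOURCE B (Python) =====
-- def f3_3(L: list) -> list:
--     """
--     Same result as the original: repeatedly remove elements equal to the
--     arithmetic mean of their neighbours, replicating the backward passes,
--     but each pass is a single O(n) scan building the surviving middle
--     elements instead of O(n) list.pop calls.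
--     """
--     res = list(L)
--     while len(res) > 2:
--         right = res[-1]          # nearest surviving right neighbour
--         kept_rev = []            # surviving middle elements, right to left
--         for left, cur in zip(reversed(res[:-2]), reversed(res[1:-1])):
--             if left + right != cur * 2:
--                 kept_rev.append(cur)
--                 right = cur
--         if len(kept_rev) == len(res) - 2:
--             break                # nothing removed: fixed point reached
--         res = [res[0]] + list(reversed(kept_rev)) + [res[-1]]
--     return res
-- ===== Notes on version B (the rewrite author's own statement) =====
-- stated objective: faster
-- what changed: Each removal pass is a single right-to-left scan that pairs every middle element with its original left neighbour and the nearest surviving right element, collecting the survivors into a new list, instead of A's index loop with repeated O(n) list.pop calls; passes repeat until a fixed point.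
import Mathlib
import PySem

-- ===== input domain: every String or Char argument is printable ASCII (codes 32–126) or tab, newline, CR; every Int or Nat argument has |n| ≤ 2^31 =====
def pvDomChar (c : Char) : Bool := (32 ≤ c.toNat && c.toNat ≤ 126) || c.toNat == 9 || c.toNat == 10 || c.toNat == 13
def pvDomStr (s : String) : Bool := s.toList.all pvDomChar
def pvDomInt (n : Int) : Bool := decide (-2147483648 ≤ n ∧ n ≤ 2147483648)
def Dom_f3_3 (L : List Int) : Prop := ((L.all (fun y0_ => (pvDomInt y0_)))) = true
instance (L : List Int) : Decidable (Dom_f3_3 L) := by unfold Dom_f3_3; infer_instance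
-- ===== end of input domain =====

-- B replaces each backward removal pass (repeated list.pop) by a single right-to-left scan
-- that collects the surviving middle elements; same value, one O(n) scan per pass.

-- ===== PORT A =====
-- inner 'while i > 0' loop of A, structural on a fuel that is always passed as i.toNat
-- (the loop runs exactly i iterations, so the fuel is never exhausted early);
-- indices are always in range there (1 <= i <= len-2), so pyGetD is exact
def f3_3_innerF : Nat → List Int → Bool → Int → List Int × Bool
  | 0, res, changed, _ => (res, changed)
  | fuel + 1, res, changed, i =>
    if 0 < i then
      if PySem.List.pyGetD res (i - 1) 0 + PySem.List.pyGetD res (i + 1) 0 = PySem.List.pyGetD res i 0 * 2 then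
        match PySem.List.pop? res i with
        | some (_, res') => f3_3_innerF fuel res' true (i - 1)
        | none => (res, changed)  -- unreachable: i is in range
      else f3_3_innerF fuel res changed (i - 1)
    else (res, changed)

-- outer 'while changed and len(result) > 2' loop of A, structural on a fuel that f3_3
-- passes as the list length (each repeated pass removes at least one element, so fewer
-- than len passes run and the fuel is never exhausted early)
def f3_3_outerF : Nat → List Int → List Int
  | 0, res => res
  | fuel + 1, res =>
    if 2 < res.length then
      let p := f3_3_innerF (PySem.List.len res - 2).toNat res false (PySem.List.len res - 2)
      if p.2 then f3_3_outerF fuel p.1 else p.1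
    else res

def f3_3 (L : List Int) : List Int := f3_3_outerF L.length L

-- ===== PORT B =====
-- one step of B's scan: keep cur unless it is the mean of left and the nearest kept right
def f3_3_step (st : List Int × Int) (p : Int × Int) : List Int × Int :=
  if p.1 + st.2 ≠ p.2 * 2 then (st.1 ++ [p.2], p.2) else st

-- B's 'while len(res) > 2' loop, structural on a fuel that f3_3_alt passes as the list
-- length (each non-final pass removes at least one element, so the fuel never runs out);
-- indices 0 and -1 are in range (len > 2), so pyGetD is exact
def f3_3_altGoF : Nat → List Int → List Int
  | 0, res => res
  | fuel + 1, res =>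
    if 2 < res.length then
      let pairs := List.zip (PySem.List.slice res none (some (-2))).reverse
                            (PySem.List.slice res (some 1) (some (-1))).reverse
      let st := pairs.foldl f3_3_step ([], PySem.List.pyGetD res (-1) 0)
      if st.1.length = res.length - 2 then res
      else f3_3_altGoF fuel ([PySem.List.pyGetD res 0 0] ++ st.1.reverse ++ [PySem.List.pyGetD res (-1) 0])
    else res

def f3_3_alt (L : List Int) : List Int := f3_3_altGoF L.length L

-- ===== PRECONDITION & SPEC =====
def Spec_f3_3 (L : List Int) (out : List Int) : Prop := out = f3_3_alt L
instance (L : List Int) (out : List Int) : Decidable (Spec_f3_3 L out) := by unfold Spec_f3_3; infer_instance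

-- ===== CLAIM (what is proved, stated in full; the proofs are below) =====
def Claim_equal_f3_3 : Prop := ∀ (L : List Int), Dom_f3_3 L → Spec_f3_3 L (f3_3 L)

-- ===== LEMMAS AND PROOFS =====

-- the mathematical result of one backward pass over l :: m :: t keeping l,
-- processed right to left: m is dropped iff it is the mean of l and the head
-- of the already-processed suffix
def pgo (l m : Int) (t : List Int) : List Int :=
  match t with
  | [] => [m]
  | x :: r =>
    let R := pgo m x r
    if l + R.headD 0 = m * 2 then R else m :: R

def passm (xs : List Int) : List Int :=
  match xs with
  | a :: b :: t => a :: pgo a b t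
  | _ => xs

lemma pgo_ne_nil (l m : Int) (t : List Int) : pgo l m t ≠ [] := by
  induction t generalizing l m with
  | nil => simp [pgo]
  | cons x r ih =>
    simp only [pgo]
    split_ifs
    · exact ih m x
    · simp

lemma pgo_len_le (l m : Int) (t : List Int) : (pgo l m t).length ≤ t.length + 1 := by
  induction t generalizing l m with
  | nil => simp [pgo]
  | cons x r ih =>
    simp only [pgo]
    have := ih m x
    split_ifs
    · simp only [List.length_cons]; omega
    · simp only [List.length_cons]; omega

lemma pgo_eq_of_len (l m : Int) (t : List Int) (h : (pgo l m t).length = t.length + 1) :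
    pgo l m t = m :: t := by
  induction t generalizing l m with
  | nil => simp [pgo]
  | cons x r ih =>
    simp only [pgo] at h ⊢
    split_ifs at h ⊢ with hc
    · exfalso; have := pgo_len_le m x r; simp only [List.length_cons] at h ⊢; omega
    · have : (pgo m x r).length = r.length + 1 := by
        simp only [List.length_cons] at h; omega
      rw [ih m x this]

lemma pgo_getLast? (l m : Int) (t : List Int) : (pgo l m t).getLast? = (m :: t).getLast? := by
  induction t generalizing l m with
  | nil => simp [pgo]
  | cons x r ih =>
    simp only [pgo]
    have hne := pgo_ne_nil m x r
    split_ifs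
    · rw [ih m x]
      cases r <;> simp
    · obtain ⟨y, R', hpg⟩ : ∃ y R', pgo m x r = y :: R' := by
        cases hpg : pgo m x r with
        | nil => exact absurd hpg hne
        | cons y R' => exact ⟨y, R', rfl⟩
      rw [hpg, List.getLast?_cons_cons, ← hpg, ih m x, List.getLast?_cons_cons]

lemma eraseIdx_app (q : List Int) (l : Int) (R : List Int) :
    (q ++ l :: R).eraseIdx q.length = q ++ R := by
  induction q with
  | nil => simp
  | cons a q ih => simpa using ih

lemma getD_app (p : List Int) (a : Int) (t : List Int) (d : Int) :
    (p ++ a :: t).getD p.length d = a := by simp [List.getD]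

lemma getD_app2 (q t : List Int) (d : Int) : (q ++ t).getD q.length d = t.getD 0 d := by
  simp [List.getD, List.getElem?_append_right]

lemma getD_zero_headD (R : List Int) (d : Int) : R.getD 0 d = R.headD d := by
  cases R <;> simp

lemma zip_rev (l l' : List Int) (h : l.length = l'.length) :
    List.zip l.reverse l'.reverse = (l.zip l').reverse := by
  simp [List.zip_eq_zipWith, List.reverse_zipWith h]

lemma zip_take_tail : ∀ (u : List Int) (a b z : Int),
    List.zip (List.take (u.length + 1) (a :: b :: (u ++ [z]))) (List.take (u.length + 1) (b :: (u ++ [z]))) =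
      List.zip (a :: b :: u) (b :: u) := by
  intro u
  induction u with
  | nil => intro a b z; simp
  | cons w u' ih =>
    intro a b z
    simp only [List.length_cons, List.take_succ_cons, List.cons_append, List.zip_cons_cons]
    have := ih b w z
    simp only [List.length_cons, List.take_succ_cons, List.cons_append, List.zip_cons_cons] at this ⊢
    rw [this]

-- the inner loop never lengthens the list
lemma f3_3_innerF_len : ∀ (n : Nat) (res : List Int) (c : Bool) (i : Int),
    (f3_3_innerF n res c i).1.length ≤ res.length := by
  intro n
  induction n with
  | zero => intro res c i; simp [f3_3_innerF]
  | succ k ih =>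
    intro res c i
    rw [f3_3_innerF]
    split_ifs with h0 hc
    · cases hp : PySem.List.pop? res i with
      | none => simp
      | some r =>
        obtain ⟨v, res'⟩ := r
        have hlen : res'.length + 1 = res.length := PySem.List.length_of_pop?_eq_some _ hp
        have h1 := ih res' true (i - 1)
        dsimp only
        omega
    · exact ih res c (i - 1)
    · simp

-- the inner loop computes the pass: state = untouched prefix ++ l :: processed suffix
lemma inner_spec : ∀ (pre : List Int) (l m : Int) (rest : List Int) (c : Bool),
    f3_3_innerF pre.length (pre ++ l :: pgo l m rest) c (pre.length : Int) =
      (passm (pre ++ l :: m :: rest),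
       c || decide ((passm (pre ++ l :: m :: rest)).length < (pre ++ l :: pgo l m rest).length)) := by
  intro pre
  induction pre using List.reverseRecOn with
  | nil =>
    intro l m rest c
    simp [f3_3_innerF, passm]
  | append_singleton p a ih =>
    intro l m rest c
    have hR := pgo_ne_nil l m rest
    rw [show (p ++ [a]).length = p.length + 1 from by simp]
    rw [f3_3_innerF]
    rw [show (((p.length + 1 : Nat)) : Int) = ((p.length : Nat) : Int) + 1 by push_cast; ring]
    rw [if_pos (by omega : (0:Int) < (p.length : Int) + 1)]
    rw [show ((p.length : Int) + 1 - 1) = ((p.length : Nat) : Int) by ring]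
    rw [show ((p.length : Int) + 1 + 1) = (((p.length + 2 : Nat)) : Int) by push_cast; ring]
    rw [show ((p.length : Int) + 1) = (((p.length + 1 : Nat)) : Int) by push_cast; ring]
    simp only [PySem.List.pyGetD_natCast]
    have r1 : ((p ++ [a]) ++ l :: pgo l m rest).getD p.length 0 = a := by
      rw [show (p ++ [a]) ++ l :: pgo l m rest = p ++ a :: (l :: pgo l m rest) by simp]
      exact getD_app p a _ 0
    have r2 : ((p ++ [a]) ++ l :: pgo l m rest).getD (p.length + 1) 0 = l := by
      rw [show p.length + 1 = (p ++ [a]).length by simp]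
      exact getD_app (p ++ [a]) l _ 0
    have r3 : ((p ++ [a]) ++ l :: pgo l m rest).getD (p.length + 2) 0 = (pgo l m rest).headD 0 := by
      rw [show (p ++ [a]) ++ l :: pgo l m rest = ((p ++ [a]) ++ [l]) ++ pgo l m rest by simp,
          show p.length + 2 = ((p ++ [a]) ++ [l]).length by simp]
      rw [getD_app2, getD_zero_headD]
    rw [r1, r2, r3]
    by_cases hc : a + (pgo l m rest).headD 0 = l * 2
    · rw [if_pos hc]
      have hpop : PySem.List.pop? ((p ++ [a]) ++ l :: pgo l m rest) (((p.length + 1 : Nat)) : Int)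
          = some (l, (p ++ [a]) ++ pgo l m rest) := by
        rw [show p.length + 1 = (p ++ [a]).length by simp]
        rw [PySem.List.pop?_natCast (h := by simp)]
        congr 1
        rw [Prod.mk.injEq]
        constructor
        · rw [List.getElem_append_right (by simp)]
          simp
        · exact eraseIdx_app (p ++ [a]) l (pgo l m rest)
      rw [hpop]
      dsimp only
      have hRa : pgo a l (m :: rest) = pgo l m rest := by
        simp only [pgo]; rw [if_pos hc]
      rw [show (p ++ [a]) ++ pgo l m rest = p ++ a :: pgo l m rest by simp]
      rw [← hRa, ih a l (m :: rest) true]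
      have hle := f3_3_innerF_len p.length (p ++ a :: pgo a l (m :: rest)) true ((p.length : Nat) : Int)
      rw [ih a l (m :: rest) true] at hle
      have hlen1 : (pgo a l (m :: rest)).length = (pgo l m rest).length := by rw [hRa]
      rw [Prod.mk.injEq]
      constructor
      · rw [show (p ++ [a]) ++ l :: m :: rest = p ++ a :: l :: m :: rest by simp]
      · simp only [Bool.true_or]
        rw [show (p ++ [a]) ++ l :: m :: rest = p ++ a :: l :: m :: rest by simp]
        simp only [List.length_append, List.length_cons] at hle ⊢
        symm
        rw [Bool.or_eq_true]
        right
        rw [decide_eq_true_iff]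
        omega
    · rw [if_neg hc]
      have hRa : pgo a l (m :: rest) = l :: pgo l m rest := by
        simp only [pgo]; rw [if_neg hc]
      rw [show (p ++ [a]) ++ l :: pgo l m rest = p ++ a :: (l :: pgo l m rest) by simp, ← hRa,
          ih a l (m :: rest) c]
      rw [hRa]
      simp

-- the fold of B's scan computes the pass suffix, reversed and without its last element
lemma fold_spec : ∀ (t' : List Int) (l m last : Int),
    List.foldr (fun p s => f3_3_step s p) ([], last) (List.zip (l :: m :: t') (m :: t')) =
      ((pgo l m (t' ++ [last])).dropLast.reverse, (pgo l m (t' ++ [last])).headD 0) := by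
  intro t'
  induction t' with
  | nil =>
    intro l m last
    by_cases hc : l + last = m * 2 <;>
      simp [pgo, f3_3_step, hc]
  | cons x u ih =>
    intro l m last
    rw [List.zip_cons_cons, List.foldr_cons, ih m x last]
    have hne := pgo_ne_nil m x (u ++ [last])
    simp only [List.cons_append, pgo]
    by_cases hc : l + (pgo m x (u ++ [last])).headD 0 = m * 2
    · rw [if_pos hc]
      have hc' : l + (pgo m x (u ++ [last])).head?.getD 0 = m * 2 := by simpa using hc
      simp [f3_3_step, hc']
    · rw [if_neg hc]
      rw [List.dropLast_cons_of_ne_nil hne]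
      have hc' : ¬ l + (pgo m x (u ++ [last])).head?.getD 0 = m * 2 := by simpa using hc
      simp [f3_3_step, hc']

lemma go_eq : ∀ (n : Nat) (xs : List Int), xs.length ≤ n → f3_3_outerF n xs = f3_3_altGoF n xs := by
  intro n
  induction n with
  | zero =>
    intro xs _
    rfl
  | succ k ih =>
    intro xs hn
    by_cases h : 2 < xs.length
    · obtain ⟨a, b, t, rfl⟩ : ∃ a b t, xs = a :: b :: t := by
        cases xs with
        | nil => simp at h
        | cons a t1 =>
          cases t1 with
          | nil => simp at h
          | cons b t => exact ⟨a, b, t, rfl⟩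
      have ht : t ≠ [] := by
        intro h0; subst h0; simp at h
      rcases List.eq_nil_or_concat t with rfl | ⟨u, z, hz⟩
      · exact absurd rfl ht
      rw [List.concat_eq_append] at hz
      subst hz
      -- abbreviations
      have hlenres : (a :: b :: (u ++ [z])).length = u.length + 3 := by simp
      set G := pgo a b (u ++ [z]) with hG
      have hGne : G ≠ [] := pgo_ne_nil a b (u ++ [z])
      have hGle : G.length ≤ u.length + 2 := by
        have := pgo_len_le a b (u ++ [z]); simp at this; omega
      have hpassm : passm (a :: b :: (u ++ [z])) = a :: G := by simp [passm]; rw [hG]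
      -- ===== A side: one inner pass computes passm =====
      rcases List.eq_nil_or_concat (a :: b :: u) with habs | ⟨pre2, l, hpre⟩
      · simp at habs
      rw [List.concat_eq_append] at hpre
      have hplen : pre2.length = u.length + 1 := by
        have := congrArg List.length hpre; simp at this; omega
      have hres2 : pre2 ++ [l, z] = a :: b :: (u ++ [z]) := by
        rw [show pre2 ++ [l, z] = (pre2 ++ [l]) ++ [z] by simp, ← hpre]
        simp
      have hinner : f3_3_innerF (PySem.List.len (a :: b :: (u ++ [z])) - 2).toNat
            (a :: b :: (u ++ [z])) false (PySem.List.len (a :: b :: (u ++ [z])) - 2)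
          = (passm (a :: b :: (u ++ [z])),
             decide ((passm (a :: b :: (u ++ [z]))).length < (a :: b :: (u ++ [z])).length)) := by
        rw [show PySem.List.len (a :: b :: (u ++ [z])) - 2 = ((pre2.length : Nat) : Int) by
          simp only [PySem.List.len_eq, List.length_cons, List.length_append,
            List.length_singleton, List.length_nil]
          omega]
        rw [Int.toNat_natCast]
        conv_lhs => rw [← hres2]
        rw [show pre2 ++ [l, z] = pre2 ++ l :: pgo l z [] from by rfl]
        rw [inner_spec pre2 l z [] false]
        rw [show pre2 ++ l :: z :: [] = pre2 ++ [l, z] from rfl, hres2]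
        rw [show pre2 ++ l :: pgo l z [] = pre2 ++ [l, z] from rfl, hres2]
        simp only [Bool.false_or]
      -- ===== B side: slices, zip, fold =====
      have hs1 : PySem.List.slice (a :: b :: (u ++ [z])) none (some (-2))
          = List.take (u.length + 1) (a :: b :: (u ++ [z])) := by
        rw [PySem.List.slice_to_neg_ofNat _ 2 (by omega)]
        congr 1
        simp
      have hs2 : PySem.List.slice (a :: b :: (u ++ [z])) (some 1) (some (-1))
          = List.take (u.length + 1) (b :: (u ++ [z])) := by
        simp [PySem.List.slice]
      have hlast : PySem.List.pyGetD (a :: b :: (u ++ [z])) (-1) 0 = z := by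
        rw [show a :: b :: (u ++ [z]) = (a :: b :: u) ++ [z] by simp]
        exact PySem.List.pyGetD_neg_one_append_singleton _ _ _
      have hfirst : PySem.List.pyGetD (a :: b :: (u ++ [z])) 0 0 = a :=
        PySem.List.pyGetD_zero_cons _ _ _
      have hzip : List.zip (PySem.List.slice (a :: b :: (u ++ [z])) none (some (-2))).reverse
            (PySem.List.slice (a :: b :: (u ++ [z])) (some 1) (some (-1))).reverse
          = (List.zip (a :: b :: u) (b :: u)).reverse := by
        rw [hs1, hs2, zip_rev _ _ (by simp; omega), zip_take_tail u a b z]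
      have hfold : ((List.zip (PySem.List.slice (a :: b :: (u ++ [z])) none (some (-2))).reverse
              (PySem.List.slice (a :: b :: (u ++ [z])) (some 1) (some (-1))).reverse).foldl
            f3_3_step ([], PySem.List.pyGetD (a :: b :: (u ++ [z])) (-1) 0))
          = (G.dropLast.reverse, G.headD 0) := by
        rw [hzip, hlast, List.foldl_reverse, fold_spec u a b z]
      -- ===== combine =====
      by_cases hfix : G.length = u.length + 2
      · -- fixed point: nothing is removed in this pass
        have hGfull : G = b :: (u ++ [z]) := by
          apply pgo_eq_of_len; simp; omega
        have hApass : passm (a :: b :: (u ++ [z])) = a :: b :: (u ++ [z]) := by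
          rw [hpassm, hGfull]
        rw [f3_3_outerF, f3_3_altGoF, if_pos h, if_pos h]
        simp only [hinner, hfold, hApass]
        rw [if_neg (by simp), if_pos (by simp [hlenres]; omega)]
      · -- something was removed: both sides recurse on a :: G = passm xs
        have hGlt : G.length < u.length + 2 := by omega
        have hGpos : 0 < G.length := List.length_pos_of_ne_nil hGne
        have hGdrop : G.dropLast ++ [z] = G := by
          have hl? : G.getLast? = some z := by
            rw [hG, pgo_getLast?, show b :: (u ++ [z]) = (b :: u) ++ [z] by simp]
            exact List.getLast?_concat
          have := List.dropLast_concat_getLast hGne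
          rwa [List.getLast_of_mem_getLast? hl?] at this
        have hrec : [PySem.List.pyGetD (a :: b :: (u ++ [z])) 0 0] ++ G.dropLast.reverse.reverse
              ++ [PySem.List.pyGetD (a :: b :: (u ++ [z])) (-1) 0] = a :: G := by
          rw [hfirst, hlast, List.reverse_reverse]
          simp only [List.singleton_append, List.cons_append, List.nil_append, List.append_assoc]
          rw [show G.dropLast ++ [z] = G from hGdrop]
        rw [f3_3_outerF, f3_3_altGoF, if_pos h, if_pos h]
        simp only [hinner, hfold]
        rw [if_pos (by simp [hpassm, hlenres]; omega),
            if_neg (by simp [hlenres]; omega)]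
        rw [hrec, hpassm]
        exact ih (a :: G) (by simp at hn ⊢; omega)
    · rw [f3_3_outerF, f3_3_altGoF, if_neg h, if_neg h]

-- ===== VERDICT (by name: the statement is the Claim_ definition above) =====
theorem f3_3_spec : Claim_equal_f3_3 := by
  intro L _
  unfold Spec_f3_3 f3_3 f3_3_alt
  exact go_eq L.length L le_rfl
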